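-- pv_equiv track=rewrite | github.com/mook-wenyu/entroly | tests/test_readme_features_langfuse.py | build_big_context
-- ===== SOURCE A (Python) =====
-- def build_big_context(files: list, max_tokens: int = 50000) -> str:
--     """Build a large context string from multiple files (simulating what an AI tool sees)."""
--     ctx = []
--     total_chars = 0
--     for name, content in files:
--         block = f"--- {name} ---\n{content}\n"
--         if total_chars + len(block) > max_tokens * 4:
--             break
--         ctx.append(block)
--         total_chars += len(block)
--     return "\n".join(ctx)
-- ===== SOURCE B (Python) =====
-- def build_big_context(files: list, max_tokens: int = 50000) -> str:
--     """Format all blocks, take prefix sums of their lengths, then BINARY-SEARCH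
--     for the cutoff: the number of leading totals <= budget.  Correct because block
--     lengths are nonnegative, so the prefix sums are nondecreasing."""
--     budget = max_tokens * 4
--     blocks = [f"--- {name} ---\n{content}\n" for name, content in files]
--     totals = []
--     cum = 0
--     for b in blocks:
--         cum += len(b)
--         totals.append(cum)
--     lo, hi = 0, len(totals)
--     while lo < hi:
--         mid = (lo + hi) // 2
--         if totals[mid] <= budget:
--             lo = mid + 1
--         else:
--             hi = mid
--     return "\n".join(blocks[:lo])
-- ===== Notes on version B (the rewrite author's own statement) =====
-- stated objective: alternative
-- what changed: A finds the cutoff with a single linear scan that breaks on the first block overflowing the running character budget; B formats all blocks, builds the nondecreasing prefix sums of their lengths, and locates the cutoff index by binary search (bisect-right of the budget), then joins that prefix slice.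
import Mathlib
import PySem

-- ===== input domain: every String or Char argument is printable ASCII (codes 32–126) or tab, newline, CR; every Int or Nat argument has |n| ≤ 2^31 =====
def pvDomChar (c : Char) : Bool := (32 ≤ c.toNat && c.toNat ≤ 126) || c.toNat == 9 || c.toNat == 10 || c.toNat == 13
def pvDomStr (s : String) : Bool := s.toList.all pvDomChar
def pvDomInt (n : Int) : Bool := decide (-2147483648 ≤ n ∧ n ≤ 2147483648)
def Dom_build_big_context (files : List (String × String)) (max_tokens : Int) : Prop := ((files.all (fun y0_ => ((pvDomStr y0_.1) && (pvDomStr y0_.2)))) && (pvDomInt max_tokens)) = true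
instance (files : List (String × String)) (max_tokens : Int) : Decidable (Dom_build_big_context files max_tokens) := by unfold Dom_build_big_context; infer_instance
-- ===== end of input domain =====

-- B replaces A's linear break-on-overflow scan by prefix sums + binary search for the cutoff index (alternative algorithm, same overall cost).


-- the f-string block f"--- {name} ---\n{content}\n" (shared literal format of both Pythons)
def pvFmtBlock (name content : String) : List Char :=
  "--- ".toList ++ name.toList ++ " ---\n".toList ++ content.toList ++ "\n".toList

-- ===== PORT A =====
-- A's loop: running total, append block, break on first overflow
def pvLoopA (budget : Int) : List (String × String) → List (List Char) → Int → List (List Char)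
  | [], ctx, _ => ctx
  | (name, content) :: rest, ctx, total =>
    let block := pvFmtBlock name content
    if total + (block.length : Int) > budget then ctx
    else pvLoopA budget rest (ctx ++ [block]) (total + (block.length : Int))

def build_big_context (files : List (String × String)) (max_tokens : Int) : String :=
  String.ofList (PySem.Chars.join "\n".toList (pvLoopA (max_tokens * 4) files [] 0))

-- ===== PORT B =====
-- B's prefix-sum pass: cum += len(b); totals.append(cum)
def pvTotalsB (blocks : List (List Char)) : List Int :=
  (blocks.foldl (fun (s : Int × List Int) b => (s.1 + (b.length : Int), s.2 ++ [s.1 + (b.length : Int)])) ((0 : Int), ([] : List Int))).2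

-- B's binary search: while lo < hi: mid = (lo+hi)//2; if totals[mid] <= budget: lo = mid+1 else hi = mid
def pvBisect (totals : List Int) (budget : Int) (lo hi : Nat) : Nat :=
  if h : lo < hi then
    let mid := (lo + hi) / 2
    if totals.getD mid 0 ≤ budget then pvBisect totals budget (mid + 1) hi
    else pvBisect totals budget lo mid
  else lo
termination_by hi - lo
decreasing_by all_goals omega

def build_big_context_alt (files : List (String × String)) (max_tokens : Int) : String :=
  let blocks := files.map (fun p => pvFmtBlock p.1 p.2)
  let totals := pvTotalsB blocks
  let k := pvBisect totals (max_tokens * 4) 0 totals.length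
  String.ofList (PySem.Chars.join "\n".toList (PySem.List.slice blocks none (some (k : Int))))

-- ===== PRECONDITION & SPEC =====
def Spec_build_big_context (files : List (String × String)) (max_tokens : Int) (out : String) : Prop := out = build_big_context_alt files max_tokens
instance (files : List (String × String)) (max_tokens : Int) (out : String) : Decidable (Spec_build_big_context files max_tokens out) := by unfold Spec_build_big_context; infer_instance

-- ===== CLAIM (what is proved, stated in full; the proofs are below) =====
def Claim_equal_build_big_context : Prop := ∀ (files : List (String × String)) (max_tokens : Int), Dom_build_big_context files max_tokens → Spec_build_big_context files max_tokens (build_big_context files max_tokens)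

-- ===== LEMMAS AND PROOFS =====

-- proof-side recursive characterisation of A's "how many blocks fit", threading the running total
def pvCountAux (budget : Int) : Int → List (String × String) → Nat
  | _, [] => 0
  | total, (n, c) :: rest =>
    if total + ((pvFmtBlock n c).length : Int) > budget then 0
    else pvCountAux budget (total + ((pvFmtBlock n c).length : Int)) rest + 1

-- proof-side count of leading totals ≤ budget
def pvCountB (budget : Int) : List Int → Nat
  | [] => 0
  | t :: rest => if t ≤ budget then pvCountB budget rest + 1 else 0

-- proof-side recursive form of B's prefix sums starting from cum
def pvTotalsFrom (cum : Int) : List (List Char) → List Int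
  | [] => []
  | b :: bs => (cum + (b.length : Int)) :: pvTotalsFrom (cum + (b.length : Int)) bs

theorem pvLoopA_eq_take (budget : Int) : ∀ (fs : List (String × String)) (total : Int) (ctx : List (List Char)),
    pvLoopA budget fs ctx total = ctx ++ (fs.map (fun p => pvFmtBlock p.1 p.2)).take (pvCountAux budget total fs) := by
  intro fs
  induction fs with
  | nil => intro total ctx; simp [pvLoopA, pvCountAux]
  | cons hd tl ih =>
    intro total ctx
    obtain ⟨n, c⟩ := hd
    simp only [pvLoopA, pvCountAux]
    split
    · simp
    · rw [ih]; simp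

theorem pvTotals_foldl : ∀ (blocks : List (List Char)) (cum : Int) (acc : List Int),
    (blocks.foldl (fun (s : Int × List Int) b => (s.1 + (b.length : Int), s.2 ++ [s.1 + (b.length : Int)])) (cum, acc)).2 = acc ++ pvTotalsFrom cum blocks := by
  intro blocks
  induction blocks with
  | nil => intro cum acc; simp [pvTotalsFrom]
  | cons b bs ih => intro cum acc; simp only [List.foldl_cons]; rw [ih]; simp [pvTotalsFrom]

theorem pvCountB_totalsFrom (budget : Int) : ∀ (fs : List (String × String)) (cum : Int),
    pvCountB budget (pvTotalsFrom cum (fs.map (fun p => pvFmtBlock p.1 p.2))) = pvCountAux budget cum fs := by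
  intro fs
  induction fs with
  | nil => intro cum; simp [pvTotalsFrom, pvCountB, pvCountAux]
  | cons hd tl ih =>
    intro cum
    obtain ⟨n, c⟩ := hd
    simp only [List.map_cons, pvTotalsFrom, pvCountB, pvCountAux]
    rw [ih]
    by_cases h : cum + ((pvFmtBlock n c).length : Int) ≤ budget
    · rw [if_pos h, if_neg (by omega)]
    · rw [if_neg h, if_pos (by omega)]

-- prefix sums are bounded below by their start …
theorem pvTotalsFrom_lb : ∀ (bs : List (List Char)) (cum : Int) (x : Int), x ∈ pvTotalsFrom cum bs → cum ≤ x := by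
  intro bs
  induction bs with
  | nil => intro cum x hx; simp [pvTotalsFrom] at hx
  | cons b bs ih =>
    intro cum x hx
    simp only [pvTotalsFrom, List.mem_cons] at hx
    rcases hx with h | h
    · omega
    · have := ih _ _ h; omega

-- … hence nondecreasing
theorem pvTotalsFrom_pairwise : ∀ (bs : List (List Char)) (cum : Int), List.Pairwise (· ≤ ·) (pvTotalsFrom cum bs) := by
  intro bs
  induction bs with
  | nil => intro cum; simp [pvTotalsFrom]
  | cons b bs ih =>
    intro cum
    simp only [pvTotalsFrom, List.pairwise_cons]
    exact ⟨fun x hx => pvTotalsFrom_lb bs _ x hx, ih _⟩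

theorem pvPairwise_getD_mono (totals : List Int) (hp : List.Pairwise (· ≤ ·) totals)
    {i j : Nat} (hij : i < j) (hj : j < totals.length) : totals.getD i 0 ≤ totals.getD j 0 := by
  rw [List.getD_eq_getElem _ _ (by omega), List.getD_eq_getElem _ _ hj]
  exact List.pairwise_iff_getElem.mp hp i j (by omega) hj hij

-- binary-search invariant: the result r satisfies  "all totals before r are ≤ budget, and r = len or totals[r] > budget"
theorem pvBisect_spec (totals : List Int) (b : Int) (hp : List.Pairwise (· ≤ ·) totals) :
    ∀ (lo hi : Nat), lo ≤ hi → hi ≤ totals.length →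
    (∀ i, i < lo → totals.getD i 0 ≤ b) →
    (∀ i, hi ≤ i → i < totals.length → b < totals.getD i 0) →
    (∀ i, i < pvBisect totals b lo hi → totals.getD i 0 ≤ b) ∧
    pvBisect totals b lo hi ≤ totals.length ∧
    (pvBisect totals b lo hi = totals.length ∨ b < totals.getD (pvBisect totals b lo hi) 0) := by
  intro lo hi
  induction lo, hi using pvBisect.induct totals b with
  | case1 lo hi hlt mid hle ih =>
    intro _ hhi hbelow habove
    rw [pvBisect]
    rw [dif_pos hlt, if_pos hle]
    refine ih (by omega) hhi ?_ habove
    intro i hi'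
    rcases Nat.lt_or_ge i mid with h | h
    · exact le_trans (pvPairwise_getD_mono totals hp h (by omega)) hle
    · have : i = mid := by omega
      rw [this]; exact hle
  | case2 lo hi hlt mid hgt ih =>
    intro hlo hhi hbelow habove
    rw [pvBisect]
    rw [dif_pos hlt, if_neg hgt]
    refine ih (by omega) (by omega) hbelow ?_
    intro i hmi hilen
    rcases Nat.lt_or_ge mid i with h | h
    · exact lt_of_lt_of_le (by omega) (pvPairwise_getD_mono totals hp h hilen)
    · have : i = mid := by omega
      rw [this]; omega
  | case3 lo hi hnlt =>
    intro hlo hhi hbelow habove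
    rw [pvBisect, dif_neg hnlt]
    have heq : lo = hi := by omega
    refine ⟨hbelow, by omega, ?_⟩
    rcases Nat.lt_or_ge lo totals.length with h | h
    · exact Or.inr (habove lo (by omega) h)
    · exact Or.inl (by omega)

-- the characterisation pins down the leading count (no monotonicity needed here)
theorem pvCountB_char (b : Int) : ∀ (totals : List Int) (n : Nat), n ≤ totals.length →
    (∀ i, i < n → totals.getD i 0 ≤ b) → (n = totals.length ∨ b < totals.getD n 0) →
    pvCountB b totals = n := by
  intro totals
  induction totals with
  | nil =>
    intro n h _ _
    have hn : n = 0 := by simpa using h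
    subst hn; simp [pvCountB]
  | cons t rest ih =>
    intro n hlen hle hstop
    cases n with
    | zero =>
      have ht : b < t := by
        rcases hstop with h | h
        · simp at h
        · simpa using h
      simp [pvCountB, not_le.mpr ht]
    | succ m =>
      have ht : t ≤ b := by simpa using hle 0 (by omega)
      simp only [pvCountB, if_pos ht]
      have := ih m (by simpa using hlen)
        (fun i hi => by simpa using hle (i + 1) (by omega))
        (by rcases hstop with h | h
            · exact Or.inl (by simpa using h)
            · exact Or.inr (by simpa using h))
      omega

-- B's binary search over the prefix sums computes A's cutoff count
theorem pvBisect_eq_countAux (budget : Int) (fs : List (String × String)) :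
    pvBisect (pvTotalsFrom 0 (fs.map (fun p => pvFmtBlock p.1 p.2))) budget 0
      (pvTotalsFrom 0 (fs.map (fun p => pvFmtBlock p.1 p.2))).length = pvCountAux budget 0 fs := by
  have hp : List.Pairwise (· ≤ ·) (pvTotalsFrom 0 (fs.map (fun p => pvFmtBlock p.1 p.2))) :=
    pvTotalsFrom_pairwise _ 0
  have hspec := pvBisect_spec _ budget hp 0 (pvTotalsFrom 0 (fs.map (fun p => pvFmtBlock p.1 p.2))).length
    (by omega) (by omega) (by intro i hi; omega) (by intro i h1 h2; omega)
  have h := pvCountB_char budget _ _ hspec.2.1 hspec.1 hspec.2.2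
  rw [pvCountB_totalsFrom] at h
  omega

-- ===== VERDICT (by name: the statement is the Claim_ definition above) =====
theorem build_big_context_spec : Claim_equal_build_big_context := by
  intro files max_tokens _
  unfold Spec_build_big_context build_big_context build_big_context_alt
  rw [pvLoopA_eq_take, List.nil_append]
  simp only [pvTotalsB]
  rw [pvTotals_foldl, List.nil_append, pvBisect_eq_countAux]
  rw [PySem.List.slice_to _ (by positivity)]
  simp
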